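-- pv_equiv track=rewrite | github.com/PentaHiggs/zulip | zerver/lib/markdown_diff.py | convert_questionmark_line
-- ===== SOURCE A (Python) =====
-- from typing import List, Tuple
--
-- DiffChange = Tuple[str, int, int]
--
-- def convert_questionmark_line(questionmark_line: str, replace_is_delete: bool) -> List[DiffChange]:
--     in_insert_sequence = False
--     in_delete_sequence = False
--     beginning_index = None
--     changes_list = []  # type: List[DiffChange]
--
--     for index, char in enumerate(questionmark_line[2:].rstrip('\n')):
--         # Replace ^ depending on context
--         if char == '^':
--             char = '-' if replace_is_delete else '+'
--
--         if char == ' ':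
--             if in_insert_sequence:
--                 changes_list.append(('insert', beginning_index, index))
--                 in_insert_sequence = False
--             elif in_delete_sequence:
--                 changes_list.append(('delete', beginning_index, index))
--                 in_delete_sequence = False
--         elif char == '+':
--             if not in_insert_sequence:
--                 if in_delete_sequence:
--                     changes_list.append(('delete', beginning_index, index))
--                     in_delete_sequence = False
--                 in_insert_sequence = True
--                 beginning_index = index
--         elif char == '-':
--             if not in_delete_sequence:
--                 if in_insert_sequence:
--                     changes_list.append(('insert', beginning_index, index))
--                     in_insert_sequence = False
--                 in_delete_sequence = True
--                 beginning_index = index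
--         else:
--             raise ValueError(
--                 "Unexpected character {} in difflib.ndiff ? line output".format(char))
--
--     if in_insert_sequence:
--         changes_list.append(('insert', beginning_index, len(questionmark_line) - 2))
--     if in_delete_sequence:
--         changes_list.append(('delete', beginning_index, len(questionmark_line) - 2))
--
--     return changes_list
-- ===== SOURCE B (Python) =====
-- from typing import List, Tuple
--
-- DiffChange = Tuple[str, int, int]
--
-- def convert_questionmark_line(questionmark_line: str, replace_is_delete: bool) -> List[DiffChange]:
--     repl = '-' if replace_is_delete else '+'
--     s = ''.join(repl if c == '^' else c for c in questionmark_line[2:].rstrip('\n'))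
--     changes = []  # type: List[DiffChange]
--     i, n = 0, len(s)
--     while i < n:
--         ch = s[i]
--         j = i + 1
--         while j < n and s[j] == ch:
--             j += 1
--         if ch == '+':
--             changes.append(('insert', i, j))
--         elif ch == '-':
--             changes.append(('delete', i, j))
--         elif ch != ' ':
--             raise ValueError(
--                 "Unexpected character {} in difflib.ndiff ? line output".format(ch))
--         i = j
--     return changes
-- ===== Notes on version B (the rewrite author's own statement) =====
-- stated objective: simpler
-- what changed: Replaces A's in_insert/in_delete flag state machine with separate post-loop flush by a single run-walk that maps '^' first and emits one change per maximal run of equal characters.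
-- intended difference: On lines with trailing newline(s) and an open final '+'/'-'/'^' run, A ends the final change at len(questionmark_line)-2, which counts the stripped newline(s) and points past the marker text, while B ends it at the stripped text's length, the intended end of the run. — e.g. on convert_questionmark_line("? +\n", false): A returns [("insert", 0, 2)], B returns [("insert", 0, 1)]
import Mathlib
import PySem

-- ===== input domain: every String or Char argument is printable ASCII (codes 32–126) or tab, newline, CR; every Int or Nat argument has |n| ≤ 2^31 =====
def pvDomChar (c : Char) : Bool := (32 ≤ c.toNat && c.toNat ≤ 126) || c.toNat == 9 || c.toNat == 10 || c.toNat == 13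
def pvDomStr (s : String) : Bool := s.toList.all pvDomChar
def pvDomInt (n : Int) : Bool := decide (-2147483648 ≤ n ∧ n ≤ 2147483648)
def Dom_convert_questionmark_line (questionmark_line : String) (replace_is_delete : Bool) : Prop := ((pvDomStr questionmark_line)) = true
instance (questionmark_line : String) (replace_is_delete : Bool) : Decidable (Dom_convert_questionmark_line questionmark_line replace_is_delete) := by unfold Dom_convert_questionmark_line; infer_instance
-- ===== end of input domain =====

-- B rewrites A's flag-based state machine as a run-walk over maximal runs of equal characters (objective: simpler decomposition);
-- on lines with a trailing newline and an open final run, A's end index counts the stripped newline(s), B uses the stripped length (see D_ below).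

-- ===== PORT A =====
-- exact port of s.rstrip('\n') (single strip character)
def pvRstripNl (l : List Char) : List Char := (l.reverse.dropWhile (· == '\n')).reverse

abbrev PvSt := Bool × Bool × Option Int × List (String × Int × Int)

-- char = '-' if replace_is_delete else '+'   (the '^' replacement inside A's loop)
def pvMapC (replace_is_delete : Bool) (char : Char) : Char :=
  if char = '^' then (if replace_is_delete then '-' else '+') else char

-- one iteration of A's for-loop body (after the '^' replacement); beginning_index is Option Int
-- (Python's None); '.getD 0' is only evaluated when the corresponding flag is set, where it is 'some'.
def pvStep (st : PvSt) (index : Int) (char : Char) : PvSt :=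
  let inIns := st.1
  let inDel := st.2.1
  let beg := st.2.2.1
  let changes := st.2.2.2
  if char = ' ' then
    if inIns then (false, inDel, beg, changes ++ [("insert", beg.getD 0, index)])
    else if inDel then (inIns, false, beg, changes ++ [("delete", beg.getD 0, index)])
    else st
  else if char = '+' then
    (if !inIns then
      (if inDel then (true, false, some index, changes ++ [("delete", beg.getD 0, index)])
       else (true, inDel, some index, changes))
     else st)
  else if char = '-' then
    (if !inDel then
      (if inIns then (false, true, some index, changes ++ [("insert", beg.getD 0, index)])
       else (inIns, true, some index, changes))
     else st)
  else st  -- Python raises ValueError here; such inputs are excluded by Pre_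

def pvAStep (replace_is_delete : Bool) (st : PvSt) (p : Int × Char) : PvSt :=
  pvStep st p.1 (pvMapC replace_is_delete p.2)

def convert_questionmark_line (questionmark_line : String) (replace_is_delete : Bool) : List (String × Int × Int) :=
  let stripped := pvRstripNl (PySem.List.slice questionmark_line.toList (some 2) none)
  let st := (PySem.List.enumerate stripped 0).foldl (pvAStep replace_is_delete)
              (false, false, (none : Option Int), ([] : List (String × Int × Int)))
  let changes := if st.1 then st.2.2.2 ++ [("insert", st.2.2.1.getD 0, PySem.Str.len questionmark_line - 2)] else st.2.2.2
  let changes := if st.2.1 then changes ++ [("delete", st.2.2.1.getD 0, PySem.Str.len questionmark_line - 2)] else changes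
  changes

-- ===== PORT B =====
-- the outer while-loop of B: one maximal run of equal characters per recursive call;
-- the inner 'while j < n and s[j] == ch' is the takeWhile length
-- fuel = number of characters left, so the recursion is structural (the kernel can evaluate it);
-- pvRuns supplies fuel l.length, which always suffices since each call drops ≥ 1 character
def pvRunsF (fuel : Nat) (l : List Char) (i : Int) : List (String × Int × Int) :=
  match fuel, l with
  | _, [] => []
  | 0, _ => []
  | fuel + 1, c :: rest =>
    let k := (rest.takeWhile (fun d => d == c)).length
    let j := i + 1 + (k : Int)
    let tl := pvRunsF fuel (rest.drop k) j
    if c = '+' then ("insert", i, j) :: tl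
    else if c = '-' then ("delete", i, j) :: tl
    else tl  -- ' ' emits nothing; any other char raises ValueError in Python (excluded by Pre_)

def pvRuns (l : List Char) (i : Int) : List (String × Int × Int) := pvRunsF l.length l i

def convert_questionmark_line_alt (questionmark_line : String) (replace_is_delete : Bool) : List (String × Int × Int) :=
  let s := (pvRstripNl (PySem.List.slice questionmark_line.toList (some 2) none)).map (pvMapC replace_is_delete)
  pvRuns s 0

-- ===== PRECONDITION & SPEC =====
-- Pre_ excludes exactly the inputs on which A raises ValueError: a character other than
-- ' ', '+', '-', '^' in questionmark_line[2:].rstrip('\n').  (B raises there too.)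
def Pre_convert_questionmark_line (questionmark_line : String) (replace_is_delete : Bool) : Prop :=
  ((pvRstripNl (PySem.List.slice questionmark_line.toList (some 2) none)).all
    (fun c => c == ' ' || c == '+' || c == '-' || c == '^')) = true
instance (questionmark_line : String) (replace_is_delete : Bool) : Decidable (Pre_convert_questionmark_line questionmark_line replace_is_delete) := by unfold Pre_convert_questionmark_line; infer_instance
def pvWitness_convert_questionmark_line : String × Bool := ("? +- ^", false)

-- On inputs whose line ends in stripped newline(s) and whose stripped '?'-marker text ends in an
-- open '+'/'-'/'^' run, A ends that final change at len(questionmark_line) - 2, an index past the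
-- stripped text because it counts the stripped newline(s); B ends it at the stripped text's length,
-- the intended end of the run.
def D_convert_questionmark_line (questionmark_line : String) (replace_is_delete : Bool) : Prop :=
  (questionmark_line.toList.drop 2).getLast? = some '\n'
  ∧ ((questionmark_line.toList.drop 2).reverse.find? (fun c => c != '\n') = some '+'
     ∨ (questionmark_line.toList.drop 2).reverse.find? (fun c => c != '\n') = some '-'
     ∨ (questionmark_line.toList.drop 2).reverse.find? (fun c => c != '\n') = some '^')
instance (questionmark_line : String) (replace_is_delete : Bool) : Decidable (D_convert_questionmark_line questionmark_line replace_is_delete) := by unfold D_convert_questionmark_line; infer_instance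

def Spec_convert_questionmark_line (questionmark_line : String) (replace_is_delete : Bool) (out : List (String × Int × Int)) : Prop := ¬ D_convert_questionmark_line questionmark_line replace_is_delete → out = convert_questionmark_line_alt questionmark_line replace_is_delete
instance (questionmark_line : String) (replace_is_delete : Bool) (out : List (String × Int × Int)) : Decidable (Spec_convert_questionmark_line questionmark_line replace_is_delete out) := by unfold Spec_convert_questionmark_line; infer_instance

def pvDiffWitness_convert_questionmark_line : String × Bool := ("? +\n", false)
def pvDiffWitnessOut_convert_questionmark_line : (List (String × Int × Int)) × (List (String × Int × Int)) :=
  ([("insert", 0, 2)], [("insert", 0, 1)])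

-- ===== CLAIM (what is proved, stated in full; the proofs are below) =====
def Claim_unchanged_convert_questionmark_line : Prop := ∀ (questionmark_line : String) (replace_is_delete : Bool), Dom_convert_questionmark_line questionmark_line replace_is_delete → Pre_convert_questionmark_line questionmark_line replace_is_delete → Spec_convert_questionmark_line questionmark_line replace_is_delete (convert_questionmark_line questionmark_line replace_is_delete)
def Claim_changed_convert_questionmark_line : Prop := Dom_convert_questionmark_line (pvDiffWitness_convert_questionmark_line.1) (pvDiffWitness_convert_questionmark_line.2) ∧ Pre_convert_questionmark_line (pvDiffWitness_convert_questionmark_line.1) (pvDiffWitness_convert_questionmark_line.2) ∧ D_convert_questionmark_line (pvDiffWitness_convert_questionmark_line.1) (pvDiffWitness_convert_questionmark_line.2) ∧ convert_questionmark_line (pvDiffWitness_convert_questionmark_line.1) (pvDiffWitness_convert_questionmark_line.2) = pvDiffWitnessOut_convert_questionmark_line.1 ∧ convert_questionmark_line_alt (pvDiffWitness_convert_questionmark_line.1) (pvDiffWitness_convert_questionmark_line.2) = pvDiffWitnessOut_convert_questionmark_line.2 ∧ pvDiffWitnessOut_convert_questionmark_line.1 ≠ pvDiffWitnessOut_conv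ert_questionmark_line.2
def Claim_exact_convert_questionmark_line : Prop := ∀ (questionmark_line : String) (replace_is_delete : Bool), Dom_convert_questionmark_line questionmark_line replace_is_delete → Pre_convert_questionmark_line questionmark_line replace_is_delete → D_convert_questionmark_line questionmark_line replace_is_delete → convert_questionmark_line questionmark_line replace_is_delete ≠ convert_questionmark_line_alt questionmark_line replace_is_delete

-- ===== LEMMAS AND PROOFS =====

-- A change emitted for one run: char, start, end
def pvEmit (c : Char) (i e : Int) : List (String × Int × Int) :=
  if c = '+' then [("insert", i, e)] else if c = '-' then [("delete", i, e)] else []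

-- run-walk like pvRuns, but a final run touching the end of the list ends at E (A's flush index)
def pvRunsE (l : List Char) (i E : Int) : List (String × Int × Int) :=
  match l with
  | [] => []
  | c :: rest =>
    let k := (rest.takeWhile (fun d => d == c)).length
    let rest' := rest.drop k
    let j := i + 1 + (k : Int)
    let e := if rest' = [] then E else j
    pvEmit c i e ++ pvRunsE rest' j E
termination_by l.length
decreasing_by simp

-- the continuation of an open run of char c started at s, with l remaining at index i
def pvExtE (c : Char) (s : Int) (l : List Char) (i E : Int) : List (String × Int × Int) :=
  let k := (l.takeWhile (fun d => d == c)).length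
  let l' := l.drop k
  let j := i + (k : Int)
  let e := if l' = [] then E else j
  pvEmit c s e ++ pvRunsE l' j E

-- A's post-loop flush
def pvFlushE (st : PvSt) (E : Int) : List (String × Int × Int) :=
  let changes := if st.1 then st.2.2.2 ++ [("insert", st.2.2.1.getD 0, E)] else st.2.2.2
  if st.2.1 then changes ++ [("delete", st.2.2.1.getD 0, E)] else changes

-- --- basic facts ---

theorem pv_rstrip_le (l : List Char) : (pvRstripNl l).length ≤ l.length := by
  simp [pvRstripNl]
  exact le_trans (List.length_dropWhile_le _ _) (by simp)

theorem pv_enum_map (f : Char → Char) : ∀ (l : List Char) (i : Int),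
    PySem.List.enumerate (l.map f) i = (PySem.List.enumerate l i).map (fun p => (p.1, f p.2)) := by
  intro l
  induction l with
  | nil => intro i; simp [PySem.List.enumerate_nil]
  | cons x xs ih => intro i; simp [PySem.List.enumerate_cons, ih]

theorem pv_foldA (rid : Bool) (l : List Char) (i : Int) (st : PvSt) :
    List.foldl (pvAStep rid) st (PySem.List.enumerate l i)
      = List.foldl (fun st (p : Int × Char) => pvStep st p.1 p.2) st
          (PySem.List.enumerate (l.map (pvMapC rid)) i) := by
  rw [pv_enum_map, List.foldl_map]
  rfl

theorem pv_last_all : ∀ (rest : List Char) (c : Char), (∀ x ∈ rest, x = c) →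
    (c :: rest).getLast? = some c := by
  intro rest
  induction rest with
  | nil => intro c _; rfl
  | cons y ys ih =>
    intro c h
    have hy : y = c := h y List.mem_cons_self
    subst hy
    rw [List.getLast?_cons_cons]
    exact ih y (fun x hx => h x (List.mem_cons_of_mem _ hx))

theorem pv_getLast_drop : ∀ (n : Nat) (xs : List Char), xs.drop n ≠ [] →
    (xs.drop n).getLast? = xs.getLast? := by
  intro n
  induction n with
  | zero => intro xs _; rfl
  | succ m ih =>
    intro xs h
    cases xs with
    | nil => simp at h
    | cons y ys =>
      rw [List.drop_succ_cons] at h ⊢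
      rw [ih ys h]
      cases hys : ys with
      | nil => subst hys; simp at h
      | cons z zs => subst hys; rw [List.getLast?_cons_cons]

-- if takeWhile swallows all of rest, every element of rest equals c
theorem pv_all_of_drop_nil (c : Char) (rest : List Char)
    (h : rest.drop ((rest.takeWhile (fun d => d == c)).length) = []) :
    ∀ x ∈ rest, x = c := by
  have hk : rest.length ≤ (rest.takeWhile (fun d => d == c)).length :=
    List.drop_eq_nil_iff.mp h
  have hpre : (rest.takeWhile (fun d => d == c)) <+: rest := List.takeWhile_prefix _
  have heq : rest.takeWhile (fun d => d == c) = rest :=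
    List.IsPrefix.eq_of_length hpre (le_antisymm hpre.length_le hk)
  intro x hx
  have hx' : x ∈ rest.takeWhile (fun d => d == c) := by rw [heq]; exact hx
  have hp : (x == c) = true := List.mem_takeWhile_imp (p := fun d => d == c) (l := rest) hx'
  exact eq_of_beq hp

-- --- unfolding lemmas for pvRunsE / pvExtE ---

theorem pv_runsE_cons (c : Char) (rest : List Char) (i E : Int) :
    pvRunsE (c :: rest) i E = pvExtE c i rest (i + 1) E := by
  rw [pvRunsE, pvExtE]

theorem pv_ext_cons_same (c : Char) (s : Int) (xs : List Char) (i E : Int) :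
    pvExtE c s (c :: xs) i E = pvExtE c s xs (i + 1) E := by
  rw [pvExtE, pvExtE]
  simp only [List.takeWhile_cons, BEq.rfl, if_true, List.length_cons, List.drop_succ_cons]
  have harith : i + (((xs.takeWhile (fun d => d == c)).length : Nat) + 1 : Nat)
      = i + 1 + ((xs.takeWhile (fun d => d == c)).length : Int) := by push_cast; ring
  rw [harith]

theorem pv_ext_cons_ne (c d : Char) (hne : d ≠ c) (s : Int) (xs : List Char) (i E : Int) :
    pvExtE c s (d :: xs) i E = pvEmit c s i ++ pvRunsE (d :: xs) i E := by
  rw [pvExtE]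
  simp [hne]

theorem pv_ext_space (s : Int) : ∀ (l : List Char) (i E : Int),
    pvExtE ' ' s l i E = pvRunsE l i E := by
  intro l i E
  cases l with
  | nil => simp [pvExtE, pvRunsE, pvEmit]
  | cons y ys =>
    by_cases hy : y = ' '
    · subst hy
      rw [pvExtE, pvRunsE]
      simp only [List.takeWhile_cons, BEq.rfl, if_true, List.length_cons, List.drop_succ_cons,
        pvEmit]
      have harith : i + (((ys.takeWhile (fun d => d == ' ')).length : Nat) + 1 : Nat)
          = i + 1 + ((ys.takeWhile (fun d => d == ' ')).length : Int) := by push_cast; ring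
      rw [harith]
      simp
    · rw [pv_ext_cons_ne ' ' y hy]
      simp [pvEmit]

theorem pv_runsE_space (xs : List Char) (i E : Int) :
    pvRunsE (' ' :: xs) i E = pvRunsE xs (i + 1) E := by
  rw [pv_runsE_cons, pv_ext_space]

-- --- flush facts ---

theorem pv_flush_none (b : Option Int) (acc : List (String × Int × Int)) (E : Int) :
    pvFlushE (false, false, b, acc) E = acc := rfl

-- --- the main loop invariant ---

theorem pv_loop (E : Int) : ∀ (l : List Char), (∀ c ∈ l, c = ' ' ∨ c = '+' ∨ c = '-') →
    ∀ (i : Int) (acc : List (String × Int × Int)),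
    ((∀ b : Option Int,
      pvFlushE (List.foldl (fun st (p : Int × Char) => pvStep st p.1 p.2) (false, false, b, acc)
        (PySem.List.enumerate l i)) E = acc ++ pvRunsE l i E)
    ∧ (∀ (c : Char) (s : Int), (c = '+' ∨ c = '-') →
      pvFlushE (List.foldl (fun st (p : Int × Char) => pvStep st p.1 p.2) (c == '+', c == '-', some s, acc)
        (PySem.List.enumerate l i)) E = acc ++ pvExtE c s l i E)) := by
  intro l
  induction l with
  | nil =>
    intro _ i acc
    constructor
    · intro b
      rw [PySem.List.enumerate_nil]
      simp [List.foldl_nil, pv_flush_none, pvRunsE]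
    · intro c s hc
      rw [PySem.List.enumerate_nil]
      rcases hc with hc | hc <;> subst hc <;>
        simp [List.foldl_nil, pvFlushE, pvExtE, pvRunsE, pvEmit]
  | cons x xs ih =>
    intro hall i acc
    have hx := hall x List.mem_cons_self
    have hxs : ∀ c ∈ xs, c = ' ' ∨ c = '+' ∨ c = '-' :=
      fun c hc => hall c (List.mem_cons_of_mem _ hc)
    constructor
    · intro b
      rw [PySem.List.enumerate_cons, List.foldl_cons]
      rcases hx with hx | hx | hx <;> subst hx
      · show pvFlushE (List.foldl _ (pvStep (false, false, b, acc) i ' ') _) E = _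
        rw [show pvStep (false, false, b, acc) i ' ' = (false, false, b, acc) from rfl]
        rw [(ih hxs (i + 1) acc).1 b, pv_runsE_space]
      · show pvFlushE (List.foldl _ (pvStep (false, false, b, acc) i '+') _) E = _
        rw [show pvStep (false, false, b, acc) i '+' = ('+' == '+', '+' == '-', some i, acc) from rfl]
        rw [(ih hxs (i + 1) acc).2 '+' i (Or.inl rfl), pv_runsE_cons]
      · show pvFlushE (List.foldl _ (pvStep (false, false, b, acc) i '-') _) E = _
        rw [show pvStep (false, false, b, acc) i '-' = ('-' == '+', '-' == '-', some i, acc) from rfl]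
        rw [(ih hxs (i + 1) acc).2 '-' i (Or.inr rfl), pv_runsE_cons]
    · intro c s hc
      rw [PySem.List.enumerate_cons, List.foldl_cons]
      rcases hc with hc | hc <;> subst hc <;> rcases hx with hx | hx | hx <;> subst hx
      · -- pending '+', next ' '
        show pvFlushE (List.foldl _ (pvStep ('+' == '+', '+' == '-', some s, acc) i ' ') _) E = _
        rw [show pvStep ('+' == '+', '+' == '-', some s, acc) i ' '
              = (false, false, some s, acc ++ [("insert", s, i)]) from rfl]
        rw [(ih hxs (i + 1) (acc ++ [("insert", s, i)])).1 (some s)]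
        rw [pv_ext_cons_ne '+' ' ' (by decide), pv_runsE_space]
        simp [pvEmit]
      · -- pending '+', next '+'
        show pvFlushE (List.foldl _ (pvStep ('+' == '+', '+' == '-', some s, acc) i '+') _) E = _
        rw [show pvStep ('+' == '+', '+' == '-', some s, acc) i '+'
              = ('+' == '+', '+' == '-', some s, acc) from rfl]
        rw [(ih hxs (i + 1) acc).2 '+' s (Or.inl rfl), pv_ext_cons_same]
      · -- pending '+', next '-'
        show pvFlushE (List.foldl _ (pvStep ('+' == '+', '+' == '-', some s, acc) i '-') _) E = _
        rw [show pvStep ('+' == '+', '+' == '-', some s, acc) i '-'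
              = ('-' == '+', '-' == '-', some i, acc ++ [("insert", s, i)]) from rfl]
        rw [(ih hxs (i + 1) (acc ++ [("insert", s, i)])).2 '-' i (Or.inr rfl)]
        rw [pv_ext_cons_ne '+' '-' (by decide), pv_runsE_cons]
        simp [pvEmit]
      · -- pending '-', next ' '
        show pvFlushE (List.foldl _ (pvStep ('-' == '+', '-' == '-', some s, acc) i ' ') _) E = _
        rw [show pvStep ('-' == '+', '-' == '-', some s, acc) i ' '
              = (false, false, some s, acc ++ [("delete", s, i)]) from rfl]
        rw [(ih hxs (i + 1) (acc ++ [("delete", s, i)])).1 (some s)]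
        rw [pv_ext_cons_ne '-' ' ' (by decide), pv_runsE_space]
        simp [pvEmit]
      · -- pending '-', next '+'
        show pvFlushE (List.foldl _ (pvStep ('-' == '+', '-' == '-', some s, acc) i '+') _) E = _
        rw [show pvStep ('-' == '+', '-' == '-', some s, acc) i '+'
              = ('+' == '+', '+' == '-', some i, acc ++ [("delete", s, i)]) from rfl]
        rw [(ih hxs (i + 1) (acc ++ [("delete", s, i)])).2 '+' i (Or.inl rfl)]
        rw [pv_ext_cons_ne '-' '+' (by decide), pv_runsE_cons]
        simp [pvEmit]
      · -- pending '-', next '-'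
        show pvFlushE (List.foldl _ (pvStep ('-' == '+', '-' == '-', some s, acc) i '-') _) E = _
        rw [show pvStep ('-' == '+', '-' == '-', some s, acc) i '-'
              = ('-' == '+', '-' == '-', some s, acc) from rfl]
        rw [(ih hxs (i + 1) acc).2 '-' s (Or.inr rfl), pv_ext_cons_same]

-- --- pvRuns (fuel recursion) vs pvRunsE ---

theorem pv_emit_cons (c : Char) (i j : Int) (tl : List (String × Int × Int)) :
    (if c = '+' then ("insert", i, j) :: tl
     else if c = '-' then ("delete", i, j) :: tl else tl) = pvEmit c i j ++ tl := by
  unfold pvEmit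
  split_ifs <;> simp

theorem pv_runsF_eq : ∀ (n : Nat) (l : List Char) (i : Int), l.length ≤ n →
    pvRunsF n l i = pvRunsE l i (i + (l.length : Int)) := by
  intro n
  induction n with
  | zero =>
    intro l i h
    cases l with
    | nil => rw [pvRunsF, pvRunsE]
    | cons c rest => simp at h
  | succ m ih =>
    intro l i h
    cases l with
    | nil => rw [pvRunsF, pvRunsE]
    | cons c rest =>
      rw [pvRunsF, pvRunsE]
      rw [pv_emit_cons]
      have hkle : (rest.takeWhile (fun d => d == c)).length ≤ rest.length :=
        (List.takeWhile_prefix _).length_le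
      by_cases hrest : rest.drop ((rest.takeWhile (fun d => d == c)).length) = []
      · have hk : rest.length ≤ (rest.takeWhile (fun d => d == c)).length :=
          List.drop_eq_nil_iff.mp hrest
        rw [hrest]
        rw [pvRunsE]

        have hE : i + ((c :: rest).length : Int)
            = i + 1 + ((rest.takeWhile (fun d => d == c)).length : Int) := by
          simp only [List.length_cons]
          push_cast
          omega
        rw [hE]
        simp [pvRunsF]
      · have hlen : (rest.drop ((rest.takeWhile (fun d => d == c)).length)).length ≤ m := by
        -- length of the dropped suffix is bounded by rest.length ≤ m
          have : (rest.drop ((rest.takeWhile (fun d => d == c)).length)).length = rest.length - (rest.takeWhile (fun d => d == c)).length := by simp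
          simp only [List.length_cons] at h
          omega
        rw [ih _ _ hlen]
        rw [if_neg hrest]
        have hE : i + 1 + ((rest.takeWhile (fun d => d == c)).length : Int)
              + ((rest.drop ((rest.takeWhile (fun d => d == c)).length)).length : Int)
            = i + ((c :: rest).length : Int) := by
          have : (rest.drop ((rest.takeWhile (fun d => d == c)).length)).length = rest.length - (rest.takeWhile (fun d => d == c)).length := by simp
          simp only [List.length_cons]
          push_cast [this]
          omega
        rw [hE]

-- --- the flush index E is irrelevant unless the text ends in an open '+'/'-' run ---

theorem pv_runsE_E_irrel (E' : Int) : ∀ (n : Nat) (l : List Char), l.length ≤ n →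
    ∀ (i E : Int), l.getLast? ≠ some '+' → l.getLast? ≠ some '-' →
    pvRunsE l i E = pvRunsE l i E' := by
  intro n
  induction n with
  | zero =>
    intro l h i E _ _
    cases l with
    | nil => rw [pvRunsE, pvRunsE]
    | cons c rest => simp at h
  | succ m ih =>
    intro l h i E h1 h2
    cases l with
    | nil => rw [pvRunsE, pvRunsE]
    | cons c rest =>
      rw [pvRunsE, pvRunsE]
      by_cases hrest : rest.drop ((rest.takeWhile (fun d => d == c)).length) = []
      · have hall := pv_all_of_drop_nil c rest hrest
        have hlast : (c :: rest).getLast? = some c := pv_last_all rest c hall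
        have hc1 : c ≠ '+' := fun hc => h1 (hc ▸ hlast)
        have hc2 : c ≠ '-' := fun hc => h2 (hc ▸ hlast)
        rw [hrest]
        simp [pvEmit, hc1, hc2, pvRunsE]
      · have hfloor : (rest.drop ((rest.takeWhile (fun d => d == c)).length)).length ≤ m := by
          have : (rest.drop ((rest.takeWhile (fun d => d == c)).length)).length = rest.length - (rest.takeWhile (fun d => d == c)).length := by simp
          simp only [List.length_cons] at h
          omega
        have hlastd : (rest.drop ((rest.takeWhile (fun d => d == c)).length)).getLast?
            = (c :: rest).getLast? := by
          have := pv_getLast_drop ((rest.takeWhile (fun d => d == c)).length + 1) (c :: rest)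
            (by simpa using hrest)
          simpa using this
        rw [if_neg hrest, if_neg hrest]
        rw [ih _ hfloor _ E (by rw [hlastd]; exact h1) (by rw [hlastd]; exact h2)]

-- --- with an open final marker run, the last change ends exactly at E ---

theorem pv_runsE_last (E : Int) : ∀ (n : Nat) (l : List Char), l.length ≤ n → ∀ (i : Int),
    (l.getLast? = some '+' ∨ l.getLast? = some '-') →
    ∃ knd st, (pvRunsE l i E).getLast? = some (knd, st, E) := by
  intro n
  induction n with
  | zero =>
    intro l h i hm
    cases l with
    | nil => simp at hm
    | cons c rest => simp at h
  | succ m ih =>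
    intro l h i hm
    cases l with
    | nil => simp at hm
    | cons c rest =>
      rw [pvRunsE]
      by_cases hrest : rest.drop ((rest.takeWhile (fun d => d == c)).length) = []
      · have hall := pv_all_of_drop_nil c rest hrest
        have hlast : (c :: rest).getLast? = some c := pv_last_all rest c hall
        rw [hlast] at hm
        rw [hrest]

        rcases hm with hm | hm <;> rw [Option.some_inj] at hm <;> subst hm
        · exact ⟨"insert", i, by simp [pvEmit, pvRunsE]⟩
        · exact ⟨"delete", i, by simp [pvEmit, pvRunsE]⟩
      · have hfloor : (rest.drop ((rest.takeWhile (fun d => d == c)).length)).length ≤ m := by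
          have : (rest.drop ((rest.takeWhile (fun d => d == c)).length)).length = rest.length - (rest.takeWhile (fun d => d == c)).length := by simp
          simp only [List.length_cons] at h
          omega
        have hlastd : (rest.drop ((rest.takeWhile (fun d => d == c)).length)).getLast?
            = (c :: rest).getLast? := by
          have := pv_getLast_drop ((rest.takeWhile (fun d => d == c)).length + 1) (c :: rest)
            (by simpa using hrest)
          simpa using this
        obtain ⟨knd, st, hl⟩ := ih _ hfloor
          (i + 1 + ((rest.takeWhile (fun d => d == c)).length : Int)) (by rw [hlastd]; exact hm)
        refine ⟨knd, st, ?_⟩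
        rw [if_neg hrest]
        simp [List.getLast?_append, hl]

-- --- characterizations of the two ports ---

theorem pv_allowed (q : String) (rid : Bool)
    (hpre : Pre_convert_questionmark_line q rid) :
    ∀ c ∈ (pvRstripNl (PySem.List.slice q.toList (some 2) none)).map (pvMapC rid),
      c = ' ' ∨ c = '+' ∨ c = '-' := by
  unfold Pre_convert_questionmark_line at hpre
  intro c hc
  obtain ⟨c₀, hc₀, rfl⟩ := List.mem_map.mp hc
  have hb := List.all_eq_true.mp hpre c₀ hc₀
  simp only [Bool.or_eq_true, beq_iff_eq] at hb
  rcases hb with ((hb | hb) | hb) | hb <;> subst hb <;> cases rid <;> simp [pvMapC]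

theorem pv_A_char (q : String) (rid : Bool)
    (hpre : Pre_convert_questionmark_line q rid) :
    convert_questionmark_line q rid
      = pvRunsE ((pvRstripNl (PySem.List.slice q.toList (some 2) none)).map (pvMapC rid)) 0
          (PySem.Str.len q - 2) := by
  have hA : convert_questionmark_line q rid
      = pvFlushE (List.foldl (pvAStep rid) (false, false, none, [])
          (PySem.List.enumerate (pvRstripNl (PySem.List.slice q.toList (some 2) none)) 0))
          (PySem.Str.len q - 2) := rfl
  rw [hA, pv_foldA]
  have h := (pv_loop (PySem.Str.len q - 2) _ (pv_allowed q rid hpre) 0 []).1 none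
  rw [h]
  simp

theorem pv_B_char (q : String) (rid : Bool) :
    convert_questionmark_line_alt q rid
      = pvRunsE ((pvRstripNl (PySem.List.slice q.toList (some 2) none)).map (pvMapC rid)) 0
          (0 + (((pvRstripNl (PySem.List.slice q.toList (some 2) none)).map (pvMapC rid)).length : Int)) := by
  have hB : convert_questionmark_line_alt q rid
      = pvRuns ((pvRstripNl (PySem.List.slice q.toList (some 2) none)).map (pvMapC rid)) 0 := rfl
  rw [hB, pvRuns]
  exact pv_runsF_eq _ _ 0 le_rfl

-- if the mapped text ends with a marker, the raw stripped text ended with '+', '-' or '^'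
theorem pv_last_unmap (q : String) (rid : Bool)
    (hm : ((pvRstripNl (PySem.List.slice q.toList (some 2) none)).map (pvMapC rid)).getLast? = some '+'
        ∨ ((pvRstripNl (PySem.List.slice q.toList (some 2) none)).map (pvMapC rid)).getLast? = some '-') :
    (pvRstripNl (PySem.List.slice q.toList (some 2) none)).getLast? = some '+'
    ∨ (pvRstripNl (PySem.List.slice q.toList (some 2) none)).getLast? = some '-'
    ∨ (pvRstripNl (PySem.List.slice q.toList (some 2) none)).getLast? = some '^' := by
  rw [List.getLast?_map] at hm
  cases ht : (pvRstripNl (PySem.List.slice q.toList (some 2) none)).getLast? with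
  | none => rw [ht] at hm; simp at hm
  | some c₀ =>
    rw [ht] at hm
    simp only [Option.map_some, Option.some_inj] at hm
    by_cases hcar : c₀ = '^'
    · exact Or.inr (Or.inr (by rw [hcar]))
    · have : pvMapC rid c₀ = c₀ := by simp [pvMapC, hcar]
      rw [this] at hm
      rcases hm with hm | hm
      · exact Or.inl (by rw [hm])
      · exact Or.inr (Or.inl (by rw [hm]))

-- length bookkeeping: s = questionmark_line[2:] as a char list
theorem pv_s_len (q : String) :
    (PySem.List.slice q.toList (some 2) none).length = q.toList.length - 2 := by
  rw [show ((2 : Int)) = ((2 : Nat) : Int) from rfl, PySem.List.slice_from_natCast]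
  exact List.length_drop

theorem pv_strlen (q : String) : PySem.Str.len q = (q.toList.length : Int) := by
  simp [PySem.Str.len_eq]

theorem pv_slice_drop (q : String) :
    PySem.List.slice q.toList (some 2) none = q.toList.drop 2 := by
  rw [show ((2 : Int)) = ((2 : Nat) : Int) from rfl, PySem.List.slice_from_natCast]

theorem pv_head_dropWhile (p : Char → Bool) : ∀ l : List Char,
    (l.dropWhile p).head? = l.find? (fun c => !p c) := by
  intro l
  induction l with
  | nil => rfl
  | cons x xs ih =>
    by_cases hx : p x = true
    · rw [List.dropWhile_cons_of_pos hx, List.find?_cons_of_neg (by simp [hx]), ih]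
    · rw [List.dropWhile_cons_of_neg hx, List.find?_cons_of_pos (by simp [hx])]
      rfl

theorem pv_dropWhile_lt (p : Char → Bool) (l : List Char) :
    ((l.dropWhile p).length < l.length ↔ ∃ x, l.head? = some x ∧ p x = true) := by
  cases l with
  | nil => simp
  | cons x xs =>
    by_cases hx : p x = true
    · rw [List.dropWhile_cons_of_pos hx]
      have := List.length_dropWhile_le p xs
      simp only [List.length_cons, List.head?_cons, Option.some_inj]
      constructor
      · intro _; exact ⟨x, rfl, hx⟩
      · intro _; omega
    · rw [List.dropWhile_cons_of_neg hx]
      simp only [List.length_cons, List.head?_cons, Option.some_inj]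
      constructor
      · intro hlt; omega
      · rintro ⟨y, rfl, hy⟩; exact absurd hy hx

-- D_ (a condition on the raw input) says exactly: a newline was stripped and the stripped text
-- ends with '+', '-' or '^'
theorem pv_D_iff (q : String) (rid : Bool) :
    D_convert_questionmark_line q rid ↔
      ((pvRstripNl (PySem.List.slice q.toList (some 2) none)).length
          < (PySem.List.slice q.toList (some 2) none).length
       ∧ ((pvRstripNl (PySem.List.slice q.toList (some 2) none)).getLast? = some '+'
          ∨ (pvRstripNl (PySem.List.slice q.toList (some 2) none)).getLast? = some '-'
          ∨ (pvRstripNl (PySem.List.slice q.toList (some 2) none)).getLast? = some '^')) := by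
  unfold D_convert_questionmark_line
  rw [pv_slice_drop]
  have hlen : (pvRstripNl (q.toList.drop 2)).length < (q.toList.drop 2).length
      ↔ (q.toList.drop 2).getLast? = some '\n' := by
    unfold pvRstripNl
    rw [List.length_reverse]
    conv_lhs => rw [show (q.toList.drop 2).length = (q.toList.drop 2).reverse.length by simp]
    rw [pv_dropWhile_lt]
    constructor
    · rintro ⟨x, hx, hpx⟩
      rw [List.head?_reverse] at hx
      rw [hx]
      exact congrArg some (eq_of_beq hpx)
    · intro hx
      exact ⟨'\n', by rw [List.head?_reverse, hx], by decide⟩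
  have hget : (pvRstripNl (q.toList.drop 2)).getLast?
      = (q.toList.drop 2).reverse.find? (fun c => c != '\n') := by
    unfold pvRstripNl
    rw [List.getLast?_reverse, pv_head_dropWhile]
    rfl
  rw [hlen, hget]

-- ===== VERDICT (by name: the statement is the Claim_ definition above) =====
theorem convert_questionmark_line_spec : Claim_unchanged_convert_questionmark_line := by
  intro q rid _ hpre
  unfold Spec_convert_questionmark_line
  intro hnd0
  have hnd := fun h => hnd0 ((pv_D_iff q rid).mpr h)
  rw [pv_A_char q rid hpre, pv_B_char q rid]
  by_cases hm : ((pvRstripNl (PySem.List.slice q.toList (some 2) none)).map (pvMapC rid)).getLast? = some '+'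
      ∨ ((pvRstripNl (PySem.List.slice q.toList (some 2) none)).map (pvMapC rid)).getLast? = some '-'
  · -- open final marker run: ¬ D_ forces no newline was stripped, so the two end indices agree
    have hlast4 := pv_last_unmap q rid hm
    have hlen : (pvRstripNl (PySem.List.slice q.toList (some 2) none)).length
        = (PySem.List.slice q.toList (some 2) none).length := by
      have hle := pv_rstrip_le (PySem.List.slice q.toList (some 2) none)
      have hnlt : ¬ ((pvRstripNl (PySem.List.slice q.toList (some 2) none)).length
          < (PySem.List.slice q.toList (some 2) none).length) := fun hlt => hnd ⟨hlt, hlast4⟩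
      omega
    have htne : (pvRstripNl (PySem.List.slice q.toList (some 2) none)) ≠ [] := by
      intro hnil
      rcases hlast4 with h4 | h4 | h4 <;> rw [hnil] at h4 <;> simp at h4
    have hq2 : 2 ≤ q.toList.length := by
      have hs := pv_s_len q
      have : 0 < (pvRstripNl (PySem.List.slice q.toList (some 2) none)).length :=
        List.length_pos_iff.mpr htne
      omega
    have hE : PySem.Str.len q - 2
        = 0 + (((pvRstripNl (PySem.List.slice q.toList (some 2) none)).map (pvMapC rid)).length : Int) := by
      rw [pv_strlen]
      have hs := pv_s_len q
      simp only [List.length_map]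
      omega
    rw [hE]
  · -- no open marker run: the flush index is never used
    have h1 : ((pvRstripNl (PySem.List.slice q.toList (some 2) none)).map (pvMapC rid)).getLast? ≠ some '+' := by
      intro h; exact hm (Or.inl h)
    have h2 : ((pvRstripNl (PySem.List.slice q.toList (some 2) none)).map (pvMapC rid)).getLast? ≠ some '-' := by
      intro h; exact hm (Or.inr h)
    exact pv_runsE_E_irrel _ _ _ le_rfl _ _ h1 h2
set_option maxRecDepth 40000 in
theorem convert_questionmark_line_changed : Claim_changed_convert_questionmark_line := by
  unfold Claim_changed_convert_questionmark_line Dom_convert_questionmark_line Pre_convert_questionmark_line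
    D_convert_questionmark_line pvDiffWitness_convert_questionmark_line pvDiffWitnessOut_convert_questionmark_line
  exact ⟨by decide, by decide, by decide, by decide, by decide, by decide⟩
theorem convert_questionmark_line_tight : Claim_exact_convert_questionmark_line := by
  intro q rid _ hpre hd heq
  obtain ⟨hlt, hlast4⟩ := (pv_D_iff q rid).mp hd
  -- the mapped stripped text ends with a marker
  have hm : ((pvRstripNl (PySem.List.slice q.toList (some 2) none)).map (pvMapC rid)).getLast? = some '+'
      ∨ ((pvRstripNl (PySem.List.slice q.toList (some 2) none)).map (pvMapC rid)).getLast? = some '-' := by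
    rw [List.getLast?_map]
    rcases hlast4 with h4 | h4 | h4 <;> rw [h4]
    · exact Or.inl (by simp [pvMapC])
    · exact Or.inr (by simp [pvMapC])
    · cases rid
      · exact Or.inl (by simp [pvMapC])
      · exact Or.inr (by simp [pvMapC])
  have hA := pv_A_char q rid hpre
  have hB := pv_B_char q rid
  obtain ⟨k1, s1, h1⟩ := pv_runsE_last (PySem.Str.len q - 2) _ _ le_rfl 0 hm
  obtain ⟨k2, s2, h2⟩ := pv_runsE_last
    (0 + (((pvRstripNl (PySem.List.slice q.toList (some 2) none)).map (pvMapC rid)).length : Int))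
    _ _ le_rfl 0 hm
  rw [heq, hB] at hA
  rw [← hA] at h1
  rw [h1] at h2
  simp only [Option.some_inj, Prod.mk.injEq] at h2
  have hEeq : PySem.Str.len q - 2
      = 0 + (((pvRstripNl (PySem.List.slice q.toList (some 2) none)).map (pvMapC rid)).length : Int) :=
    h2.2.2
  have hs := pv_s_len q
  rw [pv_strlen] at hEeq
  simp only [List.length_map] at hEeq
  omega
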